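-- pv_equiv track=rewrite | github.com/cxrodgers/my | misc.py | simple_sort_whisker_names
-- ===== SOURCE A (Python) =====
-- from builtins import str
--
-- def simple_sort_whisker_names(whisker_names):
--     # Order: real, then junk, then unk
--     junk_whiskers, unk_whiskers, greek_whiskers, real_whiskers = [], [], [], []
--
--     for whisker_name in whisker_names:
--         if 'junk' in whisker_name:
--             junk_whiskers.append(whisker_name)
--         elif 'unk' in whisker_name:
--             unk_whiskers.append(whisker_name)
--         elif str.islower(whisker_name):
--             greek_whiskers.append(whisker_name)
--         else:
--             real_whiskers.append(whisker_name)
--     sorted_whisker_names = (sorted(greek_whiskers) + sorted(real_whiskers) +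
--         sorted(junk_whiskers) + sorted(unk_whiskers))
--
--     return sorted_whisker_names
-- ===== SOURCE B (Python) =====
-- def simple_sort_whisker_names(whisker_names):
--     ys = sorted(whisker_names)
--     greek = [w for w in ys if 'junk' not in w and 'unk' not in w and w.islower()]
--     real = [w for w in ys if 'junk' not in w and 'unk' not in w and not w.islower()]
--     junk = [w for w in ys if 'junk' in w]
--     unk = [w for w in ys if 'junk' not in w and 'unk' in w]
--     return greek + real + junk + unk
-- ===== Notes on version B (the rewrite author's own statement) =====
-- stated objective: alternative
-- what changed: One global stable sort followed by filter passes per category, instead of partitioning into four buckets and sorting each bucket separately; correctness relies on stability: filtering a sorted list leaves each bucket sorted.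
import Mathlib
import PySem

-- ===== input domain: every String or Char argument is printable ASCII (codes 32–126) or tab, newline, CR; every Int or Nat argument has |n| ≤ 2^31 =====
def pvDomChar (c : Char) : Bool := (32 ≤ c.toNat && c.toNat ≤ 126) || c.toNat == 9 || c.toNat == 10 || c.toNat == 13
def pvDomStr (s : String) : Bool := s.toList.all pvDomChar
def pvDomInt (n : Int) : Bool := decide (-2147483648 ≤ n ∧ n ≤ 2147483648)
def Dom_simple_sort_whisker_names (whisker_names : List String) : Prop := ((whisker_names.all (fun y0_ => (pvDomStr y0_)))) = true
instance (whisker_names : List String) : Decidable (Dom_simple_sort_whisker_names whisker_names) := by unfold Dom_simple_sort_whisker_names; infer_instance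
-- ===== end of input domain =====

-- B replaces A's bucket-then-four-sorts by one global stable sort followed by filter passes (alternative decomposition, same cost).


-- ===== PORT A =====
-- str.islower(): at least one cased character and no uppercase one; exact on the ASCII domain
def pyStrIslower (s : String) : Bool :=
  s.toList.any PySem.Chars.islower && s.toList.all (fun c => !PySem.Chars.isupper c)

-- the body of A's for-loop
def stepA (st : List String × List String × List String × List String) (w : String) :
    List String × List String × List String × List String :=
  let (junk, unk, greek, real) := st
  if PySem.Str.isIn "junk" w then (junk ++ [w], unk, greek, real)
  else if PySem.Str.isIn "unk" w then (junk, unk ++ [w], greek, real)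
  else if pyStrIslower w then (junk, unk, greek ++ [w], real)
  else (junk, unk, greek, real ++ [w])

def simple_sort_whisker_names (whisker_names : List String) : List String :=
  let st := whisker_names.foldl stepA ([], [], [], [])
  let (junk, unk, greek, real) := st
  PySem.List.sorted greek (fun x => x) false ++ PySem.List.sorted real (fun x => x) false ++
    PySem.List.sorted junk (fun x => x) false ++ PySem.List.sorted unk (fun x => x) false

-- ===== PORT B =====
def simple_sort_whisker_names_alt (whisker_names : List String) : List String :=
  let ys := PySem.List.sorted whisker_names (fun x => x) false
  ys.filter (fun w => !PySem.Str.isIn "junk" w && !PySem.Str.isIn "unk" w && pyStrIslower w) ++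
    ys.filter (fun w => !PySem.Str.isIn "junk" w && !PySem.Str.isIn "unk" w && !pyStrIslower w) ++
    ys.filter (fun w => PySem.Str.isIn "junk" w) ++
    ys.filter (fun w => !PySem.Str.isIn "junk" w && PySem.Str.isIn "unk" w)

-- ===== PRECONDITION & SPEC =====
def Spec_simple_sort_whisker_names (whisker_names : List String) (out : List String) : Prop := out = simple_sort_whisker_names_alt whisker_names
instance (whisker_names : List String) (out : List String) : Decidable (Spec_simple_sort_whisker_names whisker_names out) := by unfold Spec_simple_sort_whisker_names; infer_instance

-- ===== CLAIM (what is proved, stated in full; the proofs are below) =====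
def Claim_equal_simple_sort_whisker_names : Prop := ∀ (whisker_names : List String), Dom_simple_sort_whisker_names whisker_names → Spec_simple_sort_whisker_names whisker_names (simple_sort_whisker_names whisker_names)

-- ===== LEMMAS AND PROOFS =====

-- A's partitioning loop computes the four filters of the input.
lemma foldA_eq_filters (xs : List String) (j u g r : List String) :
    xs.foldl stepA (j, u, g, r)
    = (j ++ xs.filter (fun w => PySem.Str.isIn "junk" w),
       u ++ xs.filter (fun w => !PySem.Str.isIn "junk" w && PySem.Str.isIn "unk" w),
       g ++ xs.filter (fun w => !PySem.Str.isIn "junk" w && !PySem.Str.isIn "unk" w && pyStrIslower w),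
       r ++ xs.filter (fun w => !PySem.Str.isIn "junk" w && !PySem.Str.isIn "unk" w && !pyStrIslower w)) := by
  induction xs generalizing j u g r with
  | nil => simp
  | cons x xs ih =>
    rw [List.foldl_cons]
    by_cases h1 : PySem.Chars.isIn ['j', 'u', 'n', 'k'] x.toList = true
    · have hs : stepA (j, u, g, r) x = (j ++ [x], u, g, r) := by simp [stepA, h1]
      rw [hs, ih]; simp [h1]
    · by_cases h2 : PySem.Chars.isIn ['u', 'n', 'k'] x.toList = true
      · have hs : stepA (j, u, g, r) x = (j, u ++ [x], g, r) := by simp [stepA, h1, h2]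
        rw [hs, ih]; simp [h1, h2]
      · by_cases h3 : pyStrIslower x = true
        · have hs : stepA (j, u, g, r) x = (j, u, g ++ [x], r) := by simp [stepA, h1, h2, h3]
          rw [hs, ih]; simp [h1, h2, h3]
        · have hs : stepA (j, u, g, r) x = (j, u, g, r ++ [x]) := by simp [stepA, h1, h2, h3]
          rw [hs, ih]; simp [h1, h2, h3]

-- stable sort commutes with filter (id key)
lemma sorted_filter_comm (xs : List String) (p : String → Bool) :
    PySem.List.sorted (xs.filter p) (fun x => x) false
      = (PySem.List.sorted xs (fun x => x) false).filter p := by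
  apply PySem.List.sorted_id_eq_of_perm_of_pairwise
  · exact (PySem.List.sorted_perm xs (fun x => x) false).filter p
  · exact (PySem.List.sorted_pairwise xs (fun x => x)).filter p

-- ===== VERDICT (by name: the statement is the Claim_ definition above) =====
theorem simple_sort_whisker_names_spec : Claim_equal_simple_sort_whisker_names := by
  intro xs _
  unfold Spec_simple_sort_whisker_names simple_sort_whisker_names simple_sort_whisker_names_alt
  rw [foldA_eq_filters]
  simp only [List.nil_append]
  rw [sorted_filter_comm, sorted_filter_comm, sorted_filter_comm, sorted_filter_comm]
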